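-- pv_equiv track=rewrite | github.com/leoquiroa/DS-A | Applications/Qixe/encrypted_words.py | findEncryptedWord
-- ===== SOURCE A (Python) =====
-- def findEncryptedWord(s):
--     if len(s) <= 2: return s
--     middle_len = int(len(s)/2)
--     middle = middle_len-1 if middle_len%2==0 else middle_len
--     new_word = s[middle] + \
--                 findEncryptedWord(s[:middle]) + \
--                 findEncryptedWord(s[middle+1:])
--     return new_word
-- ===== SOURCE B (Python) =====
-- def findEncryptedWord(s):
--     # Iterative pre-order over (lo, hi) index ranges with an explicit stack.
--     stack = [(0, len(s))]
--     out = []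
--     while stack:
--         lo, hi = stack.pop()
--         L = hi - lo
--         if L <= 2:
--             out.append(s[lo:hi])
--         else:
--             mid_len = L // 2
--             middle = lo + (mid_len - 1 if mid_len % 2 == 0 else mid_len)
--             out.append(s[middle])
--             stack.append((middle + 1, hi))
--             stack.append((lo, middle))
--     return ''.join(out)
-- ===== Notes on version B (the rewrite author's own statement) =====
-- stated objective: alternative
-- what changed: Replaces A's double recursion on sliced copies of the string by an iterative explicit stack of (lo, hi) index ranges over the original string, joined once at the end; same middle-picking pre-order output.
import Mathlib
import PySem

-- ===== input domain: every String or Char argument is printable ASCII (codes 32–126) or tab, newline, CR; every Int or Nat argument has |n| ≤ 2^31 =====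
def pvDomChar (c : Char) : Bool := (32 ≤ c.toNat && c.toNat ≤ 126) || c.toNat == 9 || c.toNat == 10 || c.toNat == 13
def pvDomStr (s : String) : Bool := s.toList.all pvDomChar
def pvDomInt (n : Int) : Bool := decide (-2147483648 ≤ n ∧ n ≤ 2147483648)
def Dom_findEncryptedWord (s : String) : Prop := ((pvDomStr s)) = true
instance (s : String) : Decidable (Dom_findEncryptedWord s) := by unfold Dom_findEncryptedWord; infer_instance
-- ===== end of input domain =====

-- B replaces A's double recursion by an explicit stack of (lo, hi) index ranges
-- over the original string, emitting the same pre-order middle-picking output.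

-- middle index of a chunk of length L (relative to the chunk): the two lines
-- 'middle_len = int(len/2); middle = middle_len-1 if middle_len%2==0 else middle_len'
def fewMid (L : Nat) : Nat := if L / 2 % 2 = 0 then L / 2 - 1 else L / 2

-- termination facts cited by the ports' decreasing_by (kept tiny and external)
theorem fewMid_bounds (L : Nat) (h : 3 ≤ L) : 1 ≤ fewMid L ∧ fewMid L ≤ L - 1 := by
  unfold fewMid; split <;> omega

theorem pvRecDecTake (l : List Char) (h : ¬ l.length ≤ 2) :
    (l.take (fewMid l.length)).length < l.length := by
  simp only [List.length_take]
  have := fewMid_bounds l.length (by omega)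
  omega

theorem pvRecDecDrop (l : List Char) (h : ¬ l.length ≤ 2) :
    (l.drop (fewMid l.length + 1)).length < l.length := by
  simp only [List.length_drop]
  have := fewMid_bounds l.length (by omega)
  omega

def pvMeasure (stack : List (Nat × Nat)) : Nat := (stack.map (fun p => 2 * (p.2 - p.1) + 1)).sum

theorem pvLoopDecSmall (lo hi : Nat) (rest : List (Nat × Nat)) :
    pvMeasure rest < pvMeasure ((lo, hi) :: rest) := by
  simp only [pvMeasure, List.map_cons, List.sum_cons]; omega

theorem pvLoopDecBig (lo hi : Nat) (rest : List (Nat × Nat)) (h : ¬ hi - lo ≤ 2) :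
    pvMeasure ((lo, lo + fewMid (hi - lo)) :: (lo + fewMid (hi - lo) + 1, hi) :: rest) <
      pvMeasure ((lo, hi) :: rest) := by
  simp only [pvMeasure, List.map_cons, List.sum_cons]
  have := fewMid_bounds (hi - lo) (by omega)
  omega

-- ===== PORT A =====
-- Recursive transliteration of A over the character list.
-- Notes on exactness: int(len(s)/2) = L/2 (Nat division) for every feasible length;
-- s[:middle] / s[middle+1:] with 0 ≤ middle < len are List.take middle / List.drop (middle+1);
-- s[middle] is always in range there (1 ≤ middle < len), rendered as getD with an unreachable default.
def findEncryptedWordRec (l : List Char) : List Char :=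
  if l.length ≤ 2 then l
  else
    l.getD (fewMid l.length) ' ' ::
      (findEncryptedWordRec (l.take (fewMid l.length)) ++
       findEncryptedWordRec (l.drop (fewMid l.length + 1)))
termination_by l.length
decreasing_by
  · exact pvRecDecTake l (by assumption)
  · exact pvRecDecDrop l (by assumption)

def findEncryptedWord (s : String) : String := String.ofList (findEncryptedWordRec s.toList)

-- ===== PORT B =====
-- Explicit-stack loop over (lo, hi) ranges; out accumulates the emitted characters.
def findEncryptedWordLoop (l : List Char) (stack : List (Nat × Nat)) (out : List Char) : List Char :=
  match stack with
  | [] => out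
  | (lo, hi) :: rest =>
    if hi - lo ≤ 2 then
      findEncryptedWordLoop l rest (out ++ (l.drop lo).take (hi - lo))
    else
      findEncryptedWordLoop l
        ((lo, lo + fewMid (hi - lo)) :: (lo + fewMid (hi - lo) + 1, hi) :: rest)
        (out ++ [l.getD (lo + fewMid (hi - lo)) ' '])
termination_by pvMeasure stack
decreasing_by
  · exact pvLoopDecSmall lo hi rest
  · exact pvLoopDecBig lo hi rest (by assumption)

def findEncryptedWord_alt (s : String) : String :=
  String.ofList (findEncryptedWordLoop s.toList [(0, s.toList.length)] [])

-- ===== PRECONDITION & SPEC =====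
def Spec_findEncryptedWord (s : String) (out : String) : Prop := out = findEncryptedWord_alt s
instance (s : String) (out : String) : Decidable (Spec_findEncryptedWord s out) := by unfold Spec_findEncryptedWord; infer_instance

-- ===== CLAIM (what is proved, stated in full; the proofs are below) =====
def Claim_equal_findEncryptedWord : Prop := ∀ (s : String), Dom_findEncryptedWord s → Spec_findEncryptedWord s (findEncryptedWord s)

-- ===== LEMMAS AND PROOFS =====

-- Loop invariant: the stack's pending ranges, each solved by A's recursion on the
-- corresponding slice, are appended (in order) after the output accumulated so far.
theorem findEncryptedWordLoop_eq (l : List Char) (stack : List (Nat × Nat)) (out : List Char)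
    (h : ∀ p ∈ stack, p.2 ≤ l.length) :
    findEncryptedWordLoop l stack out =
      out ++ (stack.map (fun p => findEncryptedWordRec ((l.drop p.1).take (p.2 - p.1)))).flatten := by
  fun_induction findEncryptedWordLoop l stack out with
  | case1 => simp
  | case2 out lo hi rest hle ih =>
    have hhi : hi ≤ l.length := h (lo, hi) (by simp)
    rw [ih (fun p hp => h p (List.mem_cons_of_mem _ hp))]
    have hthis : findEncryptedWordRec ((l.drop lo).take (hi - lo)) = (l.drop lo).take (hi - lo) := by
      rw [findEncryptedWordRec]
      simp only [List.length_take, List.length_drop]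
      rw [if_pos (by omega)]
    simp [hthis]
  | case3 out lo hi rest hgt ih =>
    have hhi : hi ≤ l.length := h (lo, hi) (by simp)
    have hL : 3 ≤ hi - lo := by omega
    obtain ⟨hm1, hm2⟩ := fewMid_bounds (hi - lo) hL
    rw [ih]
    · have hlen : ((l.drop lo).take (hi - lo)).length = hi - lo := by
        simp only [List.length_take, List.length_drop]; omega
      have hrec : findEncryptedWordRec ((l.drop lo).take (hi - lo)) =
          l.getD (lo + fewMid (hi - lo)) ' ' ::
            (findEncryptedWordRec ((l.drop lo).take ((lo + fewMid (hi - lo)) - lo)) ++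
             findEncryptedWordRec ((l.drop (lo + fewMid (hi - lo) + 1)).take (hi - (lo + fewMid (hi - lo) + 1)))) := by
        rw [findEncryptedWordRec, if_neg (by omega)]
        rw [hlen]
        congr 1
        · -- slice element = original element
          have hidx : fewMid (hi - lo) < ((l.drop lo).take (hi - lo)).length := by omega
          have hidx2 : lo + fewMid (hi - lo) < l.length := by omega
          rw [List.getD_eq_getElem _ _ hidx, List.getD_eq_getElem _ _ hidx2]
          simp only [List.getElem_take, List.getElem_drop]
        · congr 2
          · rw [List.take_take]; congr 1; omega
          · rw [List.drop_take, List.drop_drop]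
            congr 1; omega
      simp only [List.map_cons, List.flatten_cons]
      rw [hrec]
      simp
    · intro p hp
      rcases List.mem_cons.1 hp with h1 | hp
      · subst h1; simpa using by omega
      · rcases List.mem_cons.1 hp with h1 | h1
        · subst h1; simpa using hhi
        · exact h p (List.mem_cons_of_mem _ h1)

-- ===== VERDICT (by name: the statement is the Claim_ definition above) =====
theorem findEncryptedWord_spec : Claim_equal_findEncryptedWord := by
  intro s _
  show findEncryptedWord s = findEncryptedWord_alt s
  unfold findEncryptedWord findEncryptedWord_alt
  rw [findEncryptedWordLoop_eq _ _ _ (by simp)]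
  simp only [List.map_cons, List.map_nil, List.flatten_cons, List.flatten_nil,
    List.append_nil, List.nil_append, List.drop_zero, Nat.sub_zero, List.take_length]
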